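-- pv_equiv track=rewrite | github.com/adriandeery/OligoManufacturability | features.py | homopolymer_runs
-- ===== SOURCE A (Python) =====
-- from typing import Dict, List, Tuple
--
-- def homopolymer_runs(seq: str) -> Dict[str, int]:
--     """
--     Longest run of each nucleotide.
--
--     Chemistry:
--     - PolyG (≥4): forms G-quadruplex structures that block coupling reagent access.
--       This is the single biggest synthesis killer for ASOs.
--     - PolyC (≥5): can form i-motif structures at low pH (relevant during deprotection)
--     - PolyA/T (≥5): less problematic but can cause polymerase slippage in PCR probes
--
--     Returns dict: {'A': max_run_A, 'T': max_run_T, 'G': max_run_G, 'C': max_run_C}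
--     """
--     seq = seq.upper()
--     runs = {nt: 0 for nt in "ATGC"}
--
--     for nt in "ATGC":
--         max_run = 0
--         current_run = 0
--         for base in seq:
--             if base == nt:
--                 current_run += 1
--                 max_run = max(max_run, current_run)
--             else:
--                 current_run = 0
--         runs[nt] = max_run
--
--     return runs
-- ===== SOURCE B (Python) =====
-- def homopolymer_runs(seq: str):
--     """Single pass over the sequence tracking the current run of the previous
--     character; update the per-nucleotide maximum as each run grows."""
--     runs = {nt: 0 for nt in "ATGC"}
--     prev = None
--     run = 0
--     for base in seq.upper():
--         run = run + 1 if base == prev else 1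
--         prev = base
--         if base in runs and run > runs[base]:
--             runs[base] = run
--     return runs
-- ===== Notes on version B (the rewrite author's own statement) =====
-- stated objective: faster
-- what changed: Replaces A's four separate per-nucleotide scans of the sequence with one single pass that tracks the current run of the previous character and updates each nucleotide's maximum as runs grow.
import Mathlib
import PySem

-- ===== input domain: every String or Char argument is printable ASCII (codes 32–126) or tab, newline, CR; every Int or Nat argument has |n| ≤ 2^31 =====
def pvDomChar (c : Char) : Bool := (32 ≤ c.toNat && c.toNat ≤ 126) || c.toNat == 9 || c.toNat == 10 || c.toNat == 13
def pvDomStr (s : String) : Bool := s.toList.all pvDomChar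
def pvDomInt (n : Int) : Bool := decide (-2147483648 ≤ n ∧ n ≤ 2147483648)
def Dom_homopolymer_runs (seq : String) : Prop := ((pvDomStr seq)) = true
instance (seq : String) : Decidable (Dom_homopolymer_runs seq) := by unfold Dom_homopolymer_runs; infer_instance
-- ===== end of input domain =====

-- B replaces A's four per-nucleotide scans of the sequence by one pass that tracks the
-- current run of the previous character (objective: faster — one scan instead of four).

-- ===== PORT A =====
-- inner 'for base in seq' loop of A for a fixed nucleotide nt; state = (max_run, current_run)
def pvMaxRunStep (nt : Char) (s : Int × Int) (b : Char) : Int × Int :=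
  if b = nt then (max s.1 (s.2 + 1), s.2 + 1) else (s.1, 0)

def homopolymer_runs (seq : String) : List (String × Int) :=
  let s := PySem.Chars.upper seq.toList
  let runs : PySem.Dict String Int :=
    "ATGC".toList.foldl (fun d nt => d.insert nt.toString 0) PySem.Dict.empty
  let runs :=
    "ATGC".toList.foldl
      (fun d nt => d.insert nt.toString (s.foldl (pvMaxRunStep nt) (0, 0)).1) runs
  runs.items

-- ===== PORT B =====
-- one step of B's single pass; state = (runs, prev, run)
def pvRunStep (st : PySem.Dict String Int × Option Char × Int) (b : Char) :
    PySem.Dict String Int × Option Char × Int :=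
  let run : Int := if some b = st.2.1 then st.2.2 + 1 else 1
  match st.1.get? b.toString with
  | some v => if run > v then (st.1.insert b.toString run, some b, run) else (st.1, some b, run)
  | none => (st.1, some b, run)

def homopolymer_runs_alt (seq : String) : List (String × Int) :=
  let runs : PySem.Dict String Int :=
    "ATGC".toList.foldl (fun d nt => d.insert nt.toString 0) PySem.Dict.empty
  ((PySem.Chars.upper seq.toList).foldl pvRunStep (runs, none, 0)).1.items

-- ===== PRECONDITION & SPEC =====
def Spec_homopolymer_runs (seq : String) (out : List (String × Int)) : Prop := out = homopolymer_runs_alt seq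
instance (seq : String) (out : List (String × Int)) : Decidable (Spec_homopolymer_runs seq out) := by unfold Spec_homopolymer_runs; infer_instance

-- ===== CLAIM (what is proved, stated in full; the proofs are below) =====
def Claim_equal_homopolymer_runs : Prop := ∀ (seq : String), Dom_homopolymer_runs seq → Spec_homopolymer_runs seq (homopolymer_runs seq)

-- ===== LEMMAS AND PROOFS =====

-- the concrete four-entry dict both programs maintain
def pvMkD (a t g c : Int) : PySem.Dict String Int :=
  PySem.Dict.mk [("A", a), ("T", t), ("G", g), ("C", c)]

-- A's current_run for nt, recovered from B's (prev, run) state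
def pvInd (nt : Char) (prev : Option Char) (run : Int) : Int :=
  if some nt = prev then run else 0

lemma pv_sing_ne (x b : Char) (h : b ≠ x) : ¬ (String.singleton x = String.singleton b) := by
  intro he
  apply h
  have h2 := congrArg String.toList he
  simpa using h2.symm

lemma pv_get_none (a t g c : Int) (b : Char) (h1 : b ≠ 'A') (h2 : b ≠ 'T') (h3 : b ≠ 'G')
    (h4 : b ≠ 'C') : (pvMkD a t g c).get? (b.toString) = none := by
  simp [pvMkD, PySem.Dict.get?]
  exact ⟨pv_sing_ne _ _ h1, pv_sing_ne _ _ h2, pv_sing_ne _ _ h3, pv_sing_ne _ _ h4⟩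

-- one step of B updates the four-entry dict exactly as one step of each of A's four scans
lemma pv_step (a t g c : Int) (prev : Option Char) (run : Int) (b : Char) :
    pvRunStep (pvMkD a t g c, prev, run) b =
    ( pvMkD ((pvMaxRunStep 'A' (a, pvInd 'A' prev run) b).1)
            ((pvMaxRunStep 'T' (t, pvInd 'T' prev run) b).1)
            ((pvMaxRunStep 'G' (g, pvInd 'G' prev run) b).1)
            ((pvMaxRunStep 'C' (c, pvInd 'C' prev run) b).1)
    , some b
    , (if some b = prev then run + 1 else 1) ) := by
  by_cases h1 : b = 'A'
  · subst h1
    have hget : (pvMkD a t g c).get? ('A'.toString) = some a := rfl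
    have hins : ∀ v, (pvMkD a t g c).insert ('A'.toString) v = pvMkD v t g c := fun _ => rfl
    simp only [pvRunStep, hget, hins, pvMaxRunStep, pvInd]
    by_cases hp : some 'A' = prev <;> simp [hp] <;> split_ifs <;> simp [pvMkD] <;> omega
  by_cases h2 : b = 'T'
  · subst h2
    have hget : (pvMkD a t g c).get? ('T'.toString) = some t := rfl
    have hins : ∀ v, (pvMkD a t g c).insert ('T'.toString) v = pvMkD a v g c := fun _ => rfl
    simp only [pvRunStep, hget, hins, pvMaxRunStep, pvInd]
    by_cases hp : some 'T' = prev <;> simp [hp] <;> split_ifs <;> simp [pvMkD] <;> omega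
  by_cases h3 : b = 'G'
  · subst h3
    have hget : (pvMkD a t g c).get? ('G'.toString) = some g := rfl
    have hins : ∀ v, (pvMkD a t g c).insert ('G'.toString) v = pvMkD a t v c := fun _ => rfl
    simp only [pvRunStep, hget, hins, pvMaxRunStep, pvInd]
    by_cases hp : some 'G' = prev <;> simp [hp] <;> split_ifs <;> simp [pvMkD] <;> omega
  by_cases h4 : b = 'C'
  · subst h4
    have hget : (pvMkD a t g c).get? ('C'.toString) = some c := rfl
    have hins : ∀ v, (pvMkD a t g c).insert ('C'.toString) v = pvMkD a t g v := fun _ => rfl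
    simp only [pvRunStep, hget, hins, pvMaxRunStep, pvInd]
    by_cases hp : some 'C' = prev <;> simp [hp] <;> split_ifs <;> simp [pvMkD] <;> omega
  · simp only [pvRunStep, pv_get_none a t g c b h1 h2 h3 h4, pvMaxRunStep, pvInd]
    simp [h1, h2, h3, h4]

-- B's recovered current_run after a step equals A's stepped current_run
lemma pv_cr (nt : Char) (x : Int) (prev : Option Char) (run : Int) (b : Char) :
    (pvMaxRunStep nt (x, pvInd nt prev run) b).2 =
    pvInd nt (some b) (if some b = prev then run + 1 else 1) := by
  simp only [pvMaxRunStep, pvInd]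
  by_cases hb : b = nt
  · subst hb
    by_cases hp : some b = prev <;> simp [hp]
  · simp [hb]
    intro h
    exact absurd h.symm hb

lemma pv_comp (nt : Char) (x : Int) (prev : Option Char) (run : Int) (b : Char)
    (cs : List Char) :
    cs.foldl (pvMaxRunStep nt)
      ((pvMaxRunStep nt (x, pvInd nt prev run) b).1,
        pvInd nt (some b) (if some b = prev then run + 1 else 1)) =
    cs.foldl (pvMaxRunStep nt) (pvMaxRunStep nt (x, pvInd nt prev run) b) := by
  congr 1
  exact Prod.ext rfl (pv_cr nt x prev run b).symm

-- loop invariant: B's single pass carries the four scans of A in its dict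
lemma pv_loop (cs : List Char) : ∀ (a t g c : Int) (prev : Option Char) (run : Int),
    (cs.foldl pvRunStep (pvMkD a t g c, prev, run)).1 =
    pvMkD ((cs.foldl (pvMaxRunStep 'A') (a, pvInd 'A' prev run)).1)
          ((cs.foldl (pvMaxRunStep 'T') (t, pvInd 'T' prev run)).1)
          ((cs.foldl (pvMaxRunStep 'G') (g, pvInd 'G' prev run)).1)
          ((cs.foldl (pvMaxRunStep 'C') (c, pvInd 'C' prev run)).1) := by
  induction cs with
  | nil => intro a t g c prev run; rfl
  | cons b cs ih =>
    intro a t g c prev run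
    rw [List.foldl_cons, pv_step, ih, List.foldl_cons, List.foldl_cons, List.foldl_cons,
        List.foldl_cons, pv_comp, pv_comp, pv_comp, pv_comp]

-- ===== VERDICT (by name: the statement is the Claim_ definition above) =====
theorem homopolymer_runs_spec : Claim_equal_homopolymer_runs := by
  intro seq _
  unfold Spec_homopolymer_runs homopolymer_runs homopolymer_runs_alt
  have hinit : "ATGC".toList.foldl (fun d nt => d.insert nt.toString 0) PySem.Dict.empty
      = pvMkD 0 0 0 0 := rfl
  have houter : ∀ s : List Char,
      "ATGC".toList.foldl
        (fun d nt => d.insert nt.toString (s.foldl (pvMaxRunStep nt) (0, 0)).1) (pvMkD 0 0 0 0)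
      = pvMkD ((s.foldl (pvMaxRunStep 'A') (0, 0)).1) ((s.foldl (pvMaxRunStep 'T') (0, 0)).1)
              ((s.foldl (pvMaxRunStep 'G') (0, 0)).1) ((s.foldl (pvMaxRunStep 'C') (0, 0)).1) :=
    fun _ => rfl
  show (List.foldl
      (fun d nt => d.insert nt.toString
        (List.foldl (pvMaxRunStep nt) (0, 0) (PySem.Chars.upper seq.toList)).1)
      (pvMkD 0 0 0 0) "ATGC".toList).items
    = (List.foldl pvRunStep (pvMkD 0 0 0 0, none, 0) (PySem.Chars.upper seq.toList)).1.items
  rw [houter, pv_loop]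
  rfl
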